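-- pv_equiv track=rewrite | github.com/PeiJieSun/agent-security-eval | agent_eval/tool_call_graph.py | _find_top_k_paths
-- ===== SOURCE A (Python) =====
-- from collections import defaultdict
--
-- def _find_top_k_paths(
--     edge_counts: dict[tuple[str, str], int],
--     node_counts: dict[str, int],
--     k: int = 5,
--     max_len: int = 6,
-- ) -> list[list[str]]:
--     """Greedy path search: for each start node, follow the highest-weight edge."""
--     # Build adjacency list sorted by weight desc
--     adj: dict[str, list[tuple[str, int]]] = defaultdict(list)
--     for (src, dst), w in edge_counts.items():
--         adj[src].append((dst, w))
--     for src in adj: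
--         adj[src].sort(key=lambda x: -x[1])
--
--     # Start from most-used tools
--     start_nodes = sorted(node_counts, key=lambda t: -node_counts[t])
--
--     paths: list[list[str]] = []
--     seen: set[tuple] = set()
--
--     for start in start_nodes[:k * 2]:
--         path = [start]
--         visited = {start}
--         current = start
--         while len(path) < max_len:
--             if current not in adj:
--                 break
--             next_options = [(t, w) for t, w in adj[current] if t not in visited]
--             if not next_options:
--                 break
--             nxt = next_options[0][0]
--             path.append(nxt)
--             visited.add(nxt)
--             current = nxt
--
--         key = tuple(path)
--         if key not in seen and len(path) > 1:
--             seen.add(key)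
--             paths.append(path)
--         if len(paths) >= k:
--             break
--
--     return paths
-- ===== SOURCE B (Python) =====
-- def _find_top_k_paths(
--     edge_counts: dict[tuple[str, str], int],
--     node_counts: dict[str, int],
--     k: int = 5,
--     max_len: int = 6,
-- ) -> list[list[str]]:
--     """Greedy path search over an unsorted adjacency map: each hop is picked by
--     max()-by-weight with default=None instead of presorting every neighbour list."""
--     adj: dict[str, list[tuple[str, int]]] = {}
--     for (s, t), w in edge_counts.items():
--         adj.setdefault(s, []).append((t, w))
--
--     def walk(start: str) -> list[str]:
--         path, visited = [start], {start}
--         cur = start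
--         while len(path) < max_len:
--             cands = [c for c in adj.get(cur, []) if c[0] not in visited]
--             best = max(cands, key=lambda c: c[1], default=None)
--             if best is None:
--                 break
--             cur = best[0]
--             path.append(cur)
--             visited.add(cur)
--         return path
--
--     order = sorted(node_counts, key=node_counts.get, reverse=True)
--     walks = [walk(s) for s in order[:k * 2]]
--
--     result: list[list[str]] = []
--     seen: set[tuple] = set()
--     for p in walks:
--         if len(p) > 1 and tuple(p) not in seen:
--             result.append(p)
--             if len(result) >= k:
--                 return result
--             seen.add(tuple(p))
--         elif len(result) >= k:
--             return result
--     return result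
-- ===== Notes on version B (the rewrite author's own statement) =====
-- stated objective: alternative
-- what changed: B builds the adjacency map with setdefault and leaves the neighbour lists unsorted, picking each hop with one max()-by-weight scan whose default=None merges A's two break conditions; it orders start nodes with reverse=True instead of a negated key, precomputes every greedy walk with a comprehension, and collects results in a branch-first loop with early returns instead of A's keep-flag-then-check loop.
import Mathlib
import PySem

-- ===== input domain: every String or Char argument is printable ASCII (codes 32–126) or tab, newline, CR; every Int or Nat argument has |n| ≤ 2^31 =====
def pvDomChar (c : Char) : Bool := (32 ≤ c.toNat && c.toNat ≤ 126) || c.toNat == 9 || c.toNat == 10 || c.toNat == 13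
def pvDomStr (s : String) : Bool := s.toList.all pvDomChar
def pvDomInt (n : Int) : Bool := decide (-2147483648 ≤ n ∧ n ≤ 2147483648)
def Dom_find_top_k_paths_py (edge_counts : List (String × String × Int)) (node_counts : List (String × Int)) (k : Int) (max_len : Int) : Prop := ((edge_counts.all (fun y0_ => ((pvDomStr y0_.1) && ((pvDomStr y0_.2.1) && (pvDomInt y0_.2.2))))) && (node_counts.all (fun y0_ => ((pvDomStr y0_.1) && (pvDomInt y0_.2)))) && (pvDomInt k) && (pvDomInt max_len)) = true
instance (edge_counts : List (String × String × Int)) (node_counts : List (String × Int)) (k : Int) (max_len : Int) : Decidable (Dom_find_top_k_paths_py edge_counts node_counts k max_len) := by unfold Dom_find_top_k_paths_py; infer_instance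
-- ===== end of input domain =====

-- B keeps the adjacency lists unsorted and picks each hop with max(default=None),
-- orders starts with reverse=True, precomputes all greedy walks and then collects
-- them with a branch-first loop (objective: alternative).

-- ===== PORT A =====
-- adj: dict[str, list[(str,int)]] built with defaultdict-append over edge_counts.items()
def adjRawA (ed : PySem.Dict (String × String) Int) : PySem.Dict String (List (String × Int)) :=
  ed.items.foldl (fun d p => d.modify p.1.1 [] (fun l => l ++ [(p.1.2, p.2)])) PySem.Dict.empty

-- for src in adj: adj[src].sort(key=lambda x: -x[1])
def sortAdjA (d : PySem.Dict String (List (String × Int))) : PySem.Dict String (List (String × Int)) :=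
  PySem.Dict.mk (d.items.map (fun p => (p.1, PySem.List.sorted p.2 (fun x => -x.2) false)))

-- the while-loop of A: fuel = max_len - 1 remaining appends (len(path) starts at 1)
def walkA (adj : PySem.Dict String (List (String × Int))) :
    Nat → List String → PySem.Set String → String → List String
  | 0, path, _, _ => path
  | fuel + 1, path, visited, current =>
    match adj.get? current with                   -- 'if current not in adj: break'
    | none => path
    | some lst =>
      match lst.filter (fun tw => !(visited.contains tw.1)) with  -- next_options
      | [] => path                                 -- 'if not next_options: break'
      | (t, _) :: _ => walkA adj fuel (path ++ [t]) (visited.add t) t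

-- the 'for start in start_nodes[:k*2]' loop with its two breaks
def loopA (adj : PySem.Dict String (List (String × Int))) (k max_len : Int) :
    List String → List (List String) → PySem.Set (List String) → List (List String)
  | [], paths, _ => paths
  | start :: rest, paths, seen =>
    let path := walkA adj (max_len - 1).toNat [start] (PySem.Set.add PySem.Set.empty start) start
    let keep := !(seen.contains path) && decide (1 < path.length)
    let paths' := if keep then paths ++ [path] else paths
    let seen' := if keep then seen.add path else seen
    if k ≤ (paths'.length : Int) then paths' else loopA adj k max_len rest paths' seen'

def find_top_k_paths_py (edge_counts : List (String × String × Int)) (node_counts : List (String × Int)) (k : Int) (max_len : Int) : List (List String) :=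
  let ed : PySem.Dict (String × String) Int :=
    PySem.Dict.ofList (edge_counts.map (fun e => ((e.1, e.2.1), e.2.2)))
  let nd : PySem.Dict String Int := PySem.Dict.ofList node_counts
  let adj := sortAdjA (adjRawA ed)
  let starts := PySem.List.sorted nd.keys (fun t => -(nd.getD t 0)) false
  loopA adj k max_len (PySem.List.slice starts none (some (k * 2))) [] PySem.Set.empty

-- ===== PORT B =====
-- adj built with setdefault-append over edge_counts.items(), left UNSORTED
def adjB (ed : PySem.Dict (String × String) Int) : PySem.Dict String (List (String × Int)) :=
  ed.items.foldl (fun d p => d.insert p.1.1 (d.getD p.1.1 [] ++ [(p.1.2, p.2)])) PySem.Dict.empty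

-- walk(start): next hop = max(cands, key=lambda c: c[1], default=None) over adj.get(cur, [])
def walkB (adj : PySem.Dict String (List (String × Int))) :
    Nat → List String → PySem.Set String → String → List String
  | 0, path, _, _ => path
  | fuel + 1, path, visited, cur =>
    let cands := (adj.getD cur []).filter (fun c => !(visited.contains c.1))
    match PySem.List.max? cands (fun c => c.2) with
    | none => path                                -- 'if best is None: break'
    | some best => walkB adj fuel (path ++ [best.1]) (visited.add best.1) best.1

-- the collect loop over the precomputed walks, branch-first with early returns
def pickB (k : Int) :
    List (List String) → List (List String) → PySem.Set (List String) → List (List String)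
  | [], result, _ => result
  | p :: rest, result, seen =>
    if decide (1 < p.length) && !(seen.contains p) then
      let result' := result ++ [p]
      if k ≤ (result'.length : Int) then result'
      else pickB k rest result' (seen.add p)
    else
      if k ≤ (result.length : Int) then result
      else pickB k rest result seen

def find_top_k_paths_py_alt (edge_counts : List (String × String × Int)) (node_counts : List (String × Int)) (k : Int) (max_len : Int) : List (List String) :=
  let ed : PySem.Dict (String × String) Int :=
    PySem.Dict.ofList (edge_counts.map (fun e => ((e.1, e.2.1), e.2.2)))
  let nd : PySem.Dict String Int := PySem.Dict.ofList node_counts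
  let adj := adjB ed
  let order := PySem.List.sorted nd.keys (fun t => nd.getD t 0) true
  let walks := (PySem.List.slice order none (some (k * 2))).map
    (fun s => walkB adj (max_len - 1).toNat [s] (PySem.Set.add PySem.Set.empty s) s)
  pickB k walks [] PySem.Set.empty

-- ===== PRECONDITION & SPEC =====
def Spec_find_top_k_paths_py (edge_counts : List (String × String × Int)) (node_counts : List (String × Int)) (k : Int) (max_len : Int) (out : List (List String)) : Prop := out = find_top_k_paths_py_alt edge_counts node_counts k max_len
instance (edge_counts : List (String × String × Int)) (node_counts : List (String × Int)) (k : Int) (max_len : Int) (out : List (List String)) : Decidable (Spec_find_top_k_paths_py edge_counts node_counts k max_len out) := by unfold Spec_find_top_k_paths_py; infer_instance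

-- ===== CLAIM (what is proved, stated in full; the proofs are below) =====
def Claim_equal_find_top_k_paths_py : Prop := ∀ (edge_counts : List (String × String × Int)) (node_counts : List (String × Int)) (k : Int) (max_len : Int), Dom_find_top_k_paths_py edge_counts node_counts k max_len → Spec_find_top_k_paths_py edge_counts node_counts k max_len (find_top_k_paths_py edge_counts node_counts k max_len)

-- ===== LEMMAS AND PROOFS =====

-- the comparison A's sorted uses for key = (fun x => -x.2)
def pvBf (a b : String × Int) : Bool := decide ((-a.2 : Int) < -b.2)

lemma insertBy_of_forall_bf (x : String × Int) (l : List (String × Int))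
    (h : ∀ z ∈ l, pvBf x z = true) :
    PySem.List.insertBy pvBf x l = x :: l := by
  cases l with
  | nil => rfl
  | cons y t => simp [PySem.List.insertBy, h y (by simp)]

lemma pairwise_insertBy (x : String × Int) (l : List (String × Int))
    (hl : l.Pairwise (fun a b => (-a.2 : Int) ≤ -b.2)) :
    (PySem.List.insertBy pvBf x l).Pairwise (fun a b => (-a.2 : Int) ≤ -b.2) := by
  induction l with
  | nil => simp [PySem.List.insertBy]
  | cons y t ih =>
    rcases List.pairwise_cons.mp hl with ⟨hy, ht⟩
    by_cases hb : pvBf x y = true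
    · have hx : (-x.2 : Int) < -y.2 := by simpa [pvBf] using hb
      simp only [PySem.List.insertBy, hb, if_true]
      refine List.pairwise_cons.mpr ⟨?_, hl⟩
      intro z hz
      rcases List.mem_cons.mp hz with rfl | hz
      · omega
      · exact le_trans (le_of_lt hx) (hy z hz)
    · simp only [PySem.List.insertBy, hb]
      refine List.pairwise_cons.mpr ⟨?_, ih ht⟩
      intro z hz
      rcases (PySem.List.mem_insertBy pvBf x z t).mp hz with hzx | hz
      · rw [hzx]
        have : ¬ ((-x.2 : Int) < -y.2) := by simpa [pvBf] using hb
        omega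
      · exact hy z hz

lemma filter_insertBy (pred : String × Int → Bool) (x : String × Int)
    (l : List (String × Int)) (hl : l.Pairwise (fun a b => (-a.2 : Int) ≤ -b.2)) :
    (PySem.List.insertBy pvBf x l).filter pred
      = if pred x then PySem.List.insertBy pvBf x (l.filter pred) else l.filter pred := by
  induction l with
  | nil => cases hp : pred x <;> simp [PySem.List.insertBy, hp]
  | cons y t ih =>
    rcases List.pairwise_cons.mp hl with ⟨hy, ht⟩
    by_cases hb : pvBf x y = true
    · have hx : (-x.2 : Int) < -y.2 := by simpa [pvBf] using hb
      have hall : ∀ z ∈ t.filter pred, pvBf x z = true := by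
        intro z hz
        have hzt := List.mem_of_mem_filter hz
        have := hy z hzt
        simp only [pvBf, decide_eq_true_eq]
        omega
      cases hp : pred x with
      | true =>
        cases hpy : pred y with
        | true =>
          simp [PySem.List.insertBy, hb, hp, hpy]
        | false =>
          simp only [PySem.List.insertBy, hb, if_true, List.filter_cons, hp, hpy,
            if_true, Bool.false_eq_true, if_false]
          rw [insertBy_of_forall_bf x (t.filter pred) hall]
      | false =>
        simp [PySem.List.insertBy, hb, List.filter_cons, hp]
    · have hins : PySem.List.insertBy pvBf x (y :: t) = y :: PySem.List.insertBy pvBf x t := by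
        simp [PySem.List.insertBy, hb]
      rw [hins]
      cases hp : pred x with
      | true =>
        cases hpy : pred y with
        | true =>
          have hins2 : PySem.List.insertBy pvBf x (y :: t.filter pred)
              = y :: PySem.List.insertBy pvBf x (t.filter pred) := by
            simp [PySem.List.insertBy, hb]
          have := ih ht
          simp only [hp, if_true] at this
          simp [hpy, hins2, this]
        | false =>
          have := ih ht
          simp only [hp, if_true] at this
          simp [hpy, this]
      | false =>
        have := ih ht
        simp only [hp, Bool.false_eq_true, if_false] at this
        simp [List.filter_cons, this]

lemma filter_foldl_insertBy (pred : String × Int → Bool) (m acc : List (String × Int))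
    (hacc : acc.Pairwise (fun a b => (-a.2 : Int) ≤ -b.2)) :
    (m.foldl (fun a x => PySem.List.insertBy pvBf x a) acc).filter pred
      = (m.filter pred).foldl (fun a x => PySem.List.insertBy pvBf x a) (acc.filter pred) := by
  induction m generalizing acc with
  | nil => simp
  | cons x m' ih =>
    simp only [List.foldl_cons, List.filter_cons]
    have hstep := filter_insertBy pred x acc hacc
    have hpw := pairwise_insertBy x acc hacc
    cases hp : pred x with
    | true =>
      simp only [hp, if_true] at hstep
      rw [ih _ hpw, hstep]
      simp
    | false =>
      simp only [hp, Bool.false_eq_true, if_false] at hstep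
      rw [ih _ hpw, hstep]
      simp

-- the library fold form of A's sort, with its comparison named pvBf
lemma sorted_eq_foldl_bf (m : List (String × Int)) :
    PySem.List.sorted m (fun x => -x.2) false
      = m.foldl (fun a x => PySem.List.insertBy pvBf x a) [] :=
  PySem.List.sorted_eq_foldl_insertBy m _

lemma filter_sorted (pred : String × Int → Bool) (m : List (String × Int)) :
    (PySem.List.sorted m (fun x => -x.2) false).filter pred
      = PySem.List.sorted (m.filter pred) (fun x => -x.2) false := by
  rw [sorted_eq_foldl_bf, sorted_eq_foldl_bf]
  simpa using filter_foldl_insertBy pred m [] (by simp)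

lemma head?_insertBy (x : String × Int) (l : List (String × Int)) :
    (PySem.List.insertBy pvBf x l).head?
      = match l.head? with
        | none => some x
        | some h => if (h.2 : Int) < x.2 then some x else some h := by
  cases l with
  | nil => rfl
  | cons y t =>
    by_cases hb : pvBf x y = true
    · have : (y.2 : Int) < x.2 := by
        have : (-x.2 : Int) < -y.2 := by simpa [pvBf] using hb
        omega
      simp [PySem.List.insertBy, hb, this]
    · have : ¬ ((y.2 : Int) < x.2) := by
        have : ¬ ((-x.2 : Int) < -y.2) := by simpa [pvBf] using hb
        omega
      simp [PySem.List.insertBy, hb, this]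

lemma head?_foldl_insertBy (m acc : List (String × Int)) :
    (m.foldl (fun a x => PySem.List.insertBy pvBf x a) acc).head?
      = m.foldl (fun o x => match o with
          | none => some x
          | some h => if (h.2 : Int) < x.2 then some x else some h) acc.head? := by
  induction m generalizing acc with
  | nil => rfl
  | cons x m' ih =>
    simp only [List.foldl_cons]
    rw [ih, head?_insertBy]

lemma head?_sorted_eq_max? (m : List (String × Int)) :
    (PySem.List.sorted m (fun x => -x.2) false).head?
      = PySem.List.max? m (fun e => e.2) := by
  rw [sorted_eq_foldl_bf, head?_foldl_insertBy]
  simp only [List.head?_nil]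
  unfold PySem.List.max?
  congr 1
  funext o x
  cases o <;> rfl

lemma find?_map_sortVals (items : List (String × List (String × Int))) (cur : String) :
    Option.map (fun x => x.2) (List.find? (fun p => p.1 == cur)
      (items.map (fun p => (p.1, PySem.List.sorted p.2 (fun x => -x.2) false))))
    = (Option.map (fun x => x.2) (List.find? (fun p => p.1 == cur) items)).map
        (fun l => PySem.List.sorted l (fun x => -x.2) false) := by
  induction items with
  | nil => rfl
  | cons p rest ih =>
    cases h : (p.1 == cur) with
    | true => simp [h]
    | false => simpa [List.find?_cons, h] using ih

lemma get?_sortAdjA (d : PySem.Dict String (List (String × Int))) (cur : String) :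
    (sortAdjA d).get? cur
      = (d.get? cur).map (fun l => PySem.List.sorted l (fun x => -x.2) false) := by
  exact find?_map_sortVals d.items cur

-- B's setdefault-append build is A's defaultdict-append build
lemma adjB_eq_adjRawA (ed : PySem.Dict (String × String) Int) : adjB ed = adjRawA ed := rfl

lemma walk_eq (ed : PySem.Dict (String × String) Int) (fuel : Nat) :
    ∀ path visited cur,
      walkA (sortAdjA (adjRawA ed)) fuel path visited cur = walkB (adjB ed) fuel path visited cur := by
  induction fuel with
  | zero => intro path visited cur; rfl
  | succ n ih =>
    intro path visited cur
    rw [walkA, walkB, adjB_eq_adjRawA]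
    cases h : (adjRawA ed).get? cur with
    | none =>
      rw [get?_sortAdjA, h]
      simp [PySem.Dict.getD_eq_get?_getD, h, PySem.List.max?]
    | some lst =>
      rw [get?_sortAdjA, h]
      simp only [Option.map_some]
      have hgd : (adjRawA ed).getD cur [] = lst := by
        rw [PySem.Dict.getD_eq_get?_getD, h]; rfl
      rw [hgd, filter_sorted]
      cases hm : PySem.List.max? (lst.filter (fun c => !(visited.contains c.1))) (fun c => c.2) with
      | none =>
        have : lst.filter (fun c => !(visited.contains c.1)) = [] :=
          (PySem.List.max?_eq_none_iff _ _).mp hm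
        rw [this]
        rfl
      | some m =>
        have hh := head?_sorted_eq_max? (lst.filter (fun c => !(visited.contains c.1)))
        rw [hm] at hh
        cases hs : PySem.List.sorted (lst.filter (fun c => !(visited.contains c.1))) (fun x => -x.2) false with
        | nil => rw [hs] at hh; simp at hh
        | cons hd tl =>
          rw [hs] at hh
          simp only [List.head?_cons, Option.some.injEq] at hh
          subst hh
          exact ih (path ++ [hd.1]) (visited.add hd.1) hd.1

-- reverse=True sorting by count is sorting by the negated count
lemma starts_eq (nd : PySem.Dict String Int) :
    PySem.List.sorted nd.keys (fun t => nd.getD t 0) true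
      = PySem.List.sorted nd.keys (fun t => -(nd.getD t 0)) false := by
  rw [PySem.List.sorted_rev_eq_foldl_insertBy, PySem.List.sorted_eq_foldl_insertBy]
  congr 1
  funext acc x
  congr 1
  funext a b
  exact decide_eq_decide.mpr (by omega)

lemma loop_eq (ed : PySem.Dict (String × String) Int) (k max_len : Int) :
    ∀ starts paths seen,
      loopA (sortAdjA (adjRawA ed)) k max_len starts paths seen
        = pickB k (starts.map (fun s =>
            walkB (adjB ed) (max_len - 1).toNat [s] (PySem.Set.add PySem.Set.empty s) s)) paths seen := by
  intro starts
  induction starts with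
  | nil => intro paths seen; rfl
  | cons s rest ih =>
    intro paths seen
    rw [List.map_cons, loopA, pickB]
    simp only [walk_eq ed]
    set p := walkB (adjB ed) (max_len - 1).toNat [s] (PySem.Set.add PySem.Set.empty s) s with hp
    have hc : (!(seen.contains p) && decide (1 < p.length))
        = (decide (1 < p.length) && !(seen.contains p)) := Bool.and_comm _ _
    simp only [hc]
    split_ifs <;> first | rfl | exact ih _ _

-- ===== VERDICT (by name: the statement is the Claim_ definition above) =====
theorem find_top_k_paths_py_spec : Claim_equal_find_top_k_paths_py := by
  intro edge_counts node_counts k max_len _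
  show find_top_k_paths_py edge_counts node_counts k max_len
      = find_top_k_paths_py_alt edge_counts node_counts k max_len
  unfold find_top_k_paths_py find_top_k_paths_py_alt
  simp only [starts_eq]
  exact loop_eq _ k max_len _ [] PySem.Set.empty
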